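-- pv_equiv track=rewrite | github.com/LeeHa-Yeon/AlgorithmStudy | JejuAlgorithm/ex80.py | solution
-- ===== SOURCE A (Python) =====
-- from itertools import combinations
--
-- def solution(list,n) :
--     answer = []
--     combiList = combinations(list,n)
--
--     for combiTuple in combiList :
--         totalStr = ''
--         for combiWord in combiTuple :
--             totalStr += combiWord
--         answer.append(totalStr)
--
--     return answer
-- ===== SOURCE B (Python) =====
-- def solution(list, n):
--     # take/skip recursion over the word list, concatenating as we choose;
--     # emits combinations in itertools' lexicographic-by-index order
--     def go(words, k, acc):
--         if k == 0:
--             return [acc]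
--         if not words:
--             return []
--         return go(words[1:], k - 1, acc + words[0]) + go(words[1:], k, acc)
--     return go(list, n, '')
-- ===== Notes on version B (the rewrite author's own statement) =====
-- stated objective: alternative
-- what changed: Replaced the itertools.combinations-of-tuples pass plus inner join loop with a single take/skip recursion over the word list that concatenates the chosen words as it descends, never materialising the tuples.
-- crash fix: For n < 0 A raises ValueError (from itertools.combinations) while B's recursion simply exhausts the list and returns []. — e.g. on solution(["a"], -1): A raises ValueError, B returns []
import Mathlib
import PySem

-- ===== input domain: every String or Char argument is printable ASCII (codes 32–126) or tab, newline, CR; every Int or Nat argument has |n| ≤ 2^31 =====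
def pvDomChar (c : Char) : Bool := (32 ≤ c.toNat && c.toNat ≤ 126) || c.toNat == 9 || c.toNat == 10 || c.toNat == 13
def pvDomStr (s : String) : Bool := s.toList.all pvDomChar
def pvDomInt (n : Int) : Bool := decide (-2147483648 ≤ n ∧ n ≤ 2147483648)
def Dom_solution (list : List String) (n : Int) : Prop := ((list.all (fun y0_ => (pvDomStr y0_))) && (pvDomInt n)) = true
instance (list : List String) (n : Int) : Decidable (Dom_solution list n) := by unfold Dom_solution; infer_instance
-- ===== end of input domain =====

-- B replaces the combinations-of-tuples pass + inner join loop by one take/skip recursion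
-- that concatenates chosen words as it descends (alternative decomposition, same cost).

-- ===== PORT A =====
-- itertools.combinations(xs, k) in its lexicographic-by-index order
def pyCombinations (xs : List String) (k : Nat) : List (List String) :=
  match k, xs with
  | 0, _ => [[]]
  | _ + 1, [] => []
  | k + 1, x :: rest => (pyCombinations rest k).map (fun t => x :: t) ++ pyCombinations rest (k + 1)

-- for each tuple: totalStr = '' then totalStr += word over the tuple; append to answer
def solution (list : List String) (n : Int) : List String :=
  (pyCombinations list n.toNat).map (fun combiTuple => combiTuple.foldl (fun totalStr w => totalStr ++ w) "")

-- ===== PORT B =====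
def solutionAltGo (words : List String) (k : Int) (acc : String) : List String :=
  if k = 0 then [acc]
  else
    match words with
    | [] => []
    | w :: rest => solutionAltGo rest (k - 1) (acc ++ w) ++ solutionAltGo rest k acc

def solution_alt (list : List String) (n : Int) : List String :=
  solutionAltGo list n ""

-- ===== PRECONDITION & SPEC =====
-- Pre_ excludes exactly n < 0, where the Python A raises ValueError (itertools.combinations).
def Pre_solution (list : List String) (n : Int) : Prop := 0 ≤ n
instance (list : List String) (n : Int) : Decidable (Pre_solution list n) := by unfold Pre_solution; infer_instance
def pvWitness_solution : List String × Int := (["ab", "c", "d"], 2)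

-- For n < 0 A raises ValueError while B's recursion exhausts the list and returns [].
def Raises_solution (list : List String) (n : Int) : Prop := n < 0
instance (list : List String) (n : Int) : Decidable (Raises_solution list n) := by unfold Raises_solution; infer_instance
def pvRaiseWitness_solution : List String × Int := (["a"], -1)
def pvRaiseWitnessOut_solution : List String := []

def Spec_solution (list : List String) (n : Int) (out : List String) : Prop := out = solution_alt list n
instance (list : List String) (n : Int) (out : List String) : Decidable (Spec_solution list n out) := by unfold Spec_solution; infer_instance

-- ===== CLAIM (what is proved, stated in full; the proofs are below) =====
def Claim_equal_solution : Prop := ∀ (list : List String) (n : Int), Dom_solution list n → Pre_solution list n → Spec_solution list n (solution list n)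
def Claim_raises_solution : Prop := (∀ (list : List String) (n : Int), Dom_solution list n → Raises_solution list n → ¬ Pre_solution list n) ∧ (Dom_solution (pvRaiseWitness_solution.1) (pvRaiseWitness_solution.2) ∧ Raises_solution (pvRaiseWitness_solution.1) (pvRaiseWitness_solution.2) ∧ solution_alt (pvRaiseWitness_solution.1) (pvRaiseWitness_solution.2) = pvRaiseWitnessOut_solution)

-- ===== LEMMAS AND PROOFS =====
theorem goAlt_eq_map (xs : List String) (k : Nat) (acc : String) :
    solutionAltGo xs (k : Int) acc
      = (pyCombinations xs k).map (fun t => t.foldl (fun s w => s ++ w) acc) := by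
  induction xs generalizing k acc with
  | nil =>
    cases k with
    | zero => simp [solutionAltGo, pyCombinations]
    | succ k =>
      simp [solutionAltGo, pyCombinations]
      omega
  | cons x rest ih =>
    cases k with
    | zero => simp [solutionAltGo, pyCombinations]
    | succ k =>
      have h : ((k + 1 : Nat) : Int) ≠ 0 := by omega
      have hk : ((k + 1 : Nat) : Int) - 1 = (k : Int) := by omega
      simp only [solutionAltGo, pyCombinations, if_neg h, hk, ih,
        List.map_append, List.map_map]
      rfl

theorem solution_spec : Claim_equal_solution := by
  intro list n _ hpre
  unfold Spec_solution solution solution_alt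
  have hn : ((n.toNat : Nat) : Int) = n := Int.toNat_of_nonneg hpre
  rw [← hn, goAlt_eq_map]
  rw [Int.toNat_natCast]

-- ===== VERDICT (by name: the statement is the Claim_ definition above) =====
def solution_raises : Claim_raises_solution := by
  unfold Claim_raises_solution
  exact ⟨fun _ n _ h hp => absurd hp (by unfold Pre_solution; unfold Raises_solution at h; omega), by decide⟩
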